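-- pv_equiv track=rewrite | github.com/mwutti/medieval18 | TimelineReader.py | sort_kill_streaks
-- ===== SOURCE A (Python) =====
-- def sort_kill_streaks(kill_streak_list):
--     result = {}
--     for round in kill_streak_list:
--         for player_id in kill_streak_list[round]:
--             kill_streak_length = len(kill_streak_list[round][player_id])
--             if kill_streak_length not in result:
--                 result[kill_streak_length] = []
--             result[kill_streak_length].append(kill_streak_list[round][player_id])
--     return result
-- ===== SOURCE B (Python) =====
-- def sort_kill_streaks(kill_streak_list):
--     streaks = [streak for players in kill_streak_list.values() for streak in players.values()]
--     lengths = list(dict.fromkeys(len(s) for s in streaks))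
--     return {n: [s for s in streaks if len(s) == n] for n in lengths}
-- ===== Notes on version B (the rewrite author's own statement) =====
-- stated objective: alternative
-- what changed: A accumulates buckets in a dict during one nested pass with create-if-missing appends; B first flattens all streaks into one list, dedups their lengths in first-encounter order, and builds each bucket by a separate filter over the flat list.
import Mathlib
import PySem

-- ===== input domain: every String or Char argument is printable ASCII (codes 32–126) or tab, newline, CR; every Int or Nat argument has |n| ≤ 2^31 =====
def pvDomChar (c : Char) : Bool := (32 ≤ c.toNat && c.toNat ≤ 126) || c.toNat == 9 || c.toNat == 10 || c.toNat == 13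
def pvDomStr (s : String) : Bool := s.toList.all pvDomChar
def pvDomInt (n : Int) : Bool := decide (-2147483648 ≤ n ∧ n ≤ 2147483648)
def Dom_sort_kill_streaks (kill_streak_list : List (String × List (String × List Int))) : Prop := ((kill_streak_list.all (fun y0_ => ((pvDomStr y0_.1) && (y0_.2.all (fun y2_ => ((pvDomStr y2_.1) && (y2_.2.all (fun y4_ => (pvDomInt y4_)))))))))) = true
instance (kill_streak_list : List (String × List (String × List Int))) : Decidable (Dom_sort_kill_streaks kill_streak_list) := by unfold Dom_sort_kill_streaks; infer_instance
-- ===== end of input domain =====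

-- B replaces A's single-pass bucket accumulation by a flatten / dedup-of-lengths / filter-per-length
-- decomposition (objective: alternative, same results in first-encounter order; not claimed faster).

-- ===== PORT A =====
-- A iterates the keys of the outer dict and, per round, the keys of the inner dict, appending each
-- streak to result[len(streak)] (creating the empty bucket first). The assoc-list inputs are read
-- through PySem.Dict.ofList, matching Python's dict semantics (last duplicate wins, first position).
def sort_kill_streaks (kill_streak_list : List (String × List (String × List Int))) : List (Int × List (List Int)) :=
  ((PySem.Dict.ofList kill_streak_list).items.foldl
    (fun result rnd =>
      (PySem.Dict.ofList rnd.2).items.foldl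
        (fun result pl =>
          let kill_streak_length : Int := pl.2.length
          let result := if result.contains kill_streak_length then result
                        else result.insert kill_streak_length ([] : List (List Int))
          result.modify kill_streak_length [] (fun xs => xs ++ [pl.2]))
        result)
    PySem.Dict.empty).items

-- ===== PORT B =====
-- B: flatten all streaks, dedup their lengths in first-encounter order, then one filter per length.
def sort_kill_streaks_alt (kill_streak_list : List (String × List (String × List Int))) : List (Int × List (List Int)) :=
  let streaks := ((PySem.Dict.ofList kill_streak_list).values.map
      (fun players => (PySem.Dict.ofList players).values)).flatten
  let lengths := PySem.List.dedup (streaks.map (fun s => (s.length : Int)))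
  lengths.map (fun n => (n, streaks.filter (fun s => (s.length : Int) == n)))

-- ===== PRECONDITION & SPEC =====
def Spec_sort_kill_streaks (kill_streak_list : List (String × List (String × List Int))) (out : List (Int × List (List Int))) : Prop := out = sort_kill_streaks_alt kill_streak_list
instance (kill_streak_list : List (String × List (String × List Int))) (out : List (Int × List (List Int))) : Decidable (Spec_sort_kill_streaks kill_streak_list out) := by unfold Spec_sort_kill_streaks; infer_instance

-- ===== CLAIM (what is proved, stated in full; the proofs are below) =====
def Claim_equal_sort_kill_streaks : Prop := ∀ (kill_streak_list : List (String × List (String × List Int))), Dom_sort_kill_streaks kill_streak_list → Spec_sort_kill_streaks kill_streak_list (sort_kill_streaks kill_streak_list)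

-- ===== LEMMAS AND PROOFS =====

-- A's "create empty bucket if missing, then append" step is one Dict.modify.
lemma pv_step_eq (d : PySem.Dict Int (List (List Int))) (k : Int)
    (f : List (List Int) → List (List Int)) :
    (if d.contains k then d else d.insert k ([] : List (List Int))).modify k [] f
      = d.modify k [] f := by
  by_cases h : d.contains k
  · simp [h]
  · have h' : ∀ x : List (List Int), (k, x) ∉ d.items := by
      simpa [PySem.Dict.contains] using h
    have hfind : d.items.find? (fun p => p.1 == k) = none := by
      apply List.find?_eq_none.mpr
      intro p hp
      have hpk : p.1 ≠ k := fun hpk => h' p.2 (by simpa [← hpk] using hp)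
      simpa using hpk
    have hget : d.getD k [] = [] := by
      simp [PySem.Dict.getD, PySem.Dict.get?, hfind]
    simp only [h, Bool.false_eq_true, if_false, PySem.Dict.modify, hget]
    rw [PySem.Dict.getD_insert_self, PySem.Dict.insert_insert_self]

-- the grouping dict A builds from any flat list of streaks, characterised
lemma pv_fold_items (streaks : List (List Int)) :
    (streaks.foldl (fun d s => d.modify ((s.length : Int)) [] (fun xs => xs ++ [s]))
        (PySem.Dict.empty : PySem.Dict Int (List (List Int)))).items
      = (PySem.List.dedup (streaks.map (fun s => (s.length : Int)))).map
          (fun n => (n, streaks.filter (fun s => (s.length : Int) == n))) := by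
  have hpairs : streaks.foldl (fun d s => d.modify ((s.length : Int)) [] (fun xs => xs ++ [s]))
        (PySem.Dict.empty : PySem.Dict Int (List (List Int)))
      = (streaks.map (fun s => ((s.length : Int), s))).foldl
          (fun d p => d.modify p.1 [] (fun xs => xs ++ [p.2])) PySem.Dict.empty := by
    rw [List.foldl_map]
  rw [hpairs]
  set D := (streaks.map (fun s => ((s.length : Int), s))).foldl
      (fun d p => d.modify p.1 [] (fun xs => xs ++ [p.2]))
      (PySem.Dict.empty : PySem.Dict Int (List (List Int))) with hD
  have hnd : D.keys.Nodup := by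
    apply PySem.Dict.nodup_keys_foldl_modify_key
    exact PySem.Dict.nodup_keys_empty
  have hkeys : D.keys = PySem.List.dedup (streaks.map (fun s => (s.length : Int))) := by
    rw [hD, PySem.Dict.keys_foldl_modify_key]
    simp [PySem.Set.update_nil_left, List.map_map, PySem.List.dedup_eq_ofList]
    rfl
  have hgetD : ∀ n : Int, D.getD n [] = streaks.filter (fun s => (s.length : Int) == n) := by
    intro n
    rw [hD, PySem.Dict.getD_foldl_modify_append]
    rw [show ((streaks.map (fun s => ((s.length : Int), s))).filter (fun p => p.1 == n))
        = (streaks.filter (fun s => ((s.length : Int) == n))).map (fun s => ((s.length : Int), s))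
      from by simp [List.filter_map]; rfl]
    simp [Function.comp_def, List.map_map]
  rw [PySem.Dict.items_eq_map_keys D hnd []]
  rw [hkeys]
  exact List.map_congr_left (fun n _ => by rw [hgetD n])

-- ===== VERDICT (by name: the statement is the Claim_ definition above) =====
theorem sort_kill_streaks_spec : Claim_equal_sort_kill_streaks := by
  intro l _
  unfold Spec_sort_kill_streaks sort_kill_streaks sort_kill_streaks_alt
  simp only [PySem.Dict.values]
  -- fuse the nested loops into one loop over the flattened streak list
  rw [show ∀ (items : List (String × List (String × List Int)))
        (d : PySem.Dict Int (List (List Int))),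
      items.foldl (fun result rnd =>
        (PySem.Dict.ofList rnd.2).items.foldl
          (fun result pl =>
            let kill_streak_length : Int := pl.2.length
            let result := if result.contains kill_streak_length then result
                          else result.insert kill_streak_length ([] : List (List Int))
            result.modify kill_streak_length [] (fun xs => xs ++ [pl.2])) result) d
      = ((items.map (fun rnd => (PySem.Dict.ofList rnd.2).items.map (fun p => p.2))).flatten).foldl
          (fun d s => d.modify ((s.length : Int)) [] (fun xs => xs ++ [s])) d
    from ?_, pv_fold_items]
  · simp [Function.comp_def, List.map_map]
  · intro items d
    rw [List.foldl_flatten, List.foldl_map]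
    congr 1
    funext acc rnd
    rw [List.foldl_map]
    congr 1
    funext r p
    exact pv_step_eq r (p.2.length : Int) (fun xs => xs ++ [p.2])
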